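-- pv_equiv track=rewrite | github.com/camposlaura/otimizacao_multiobjetiva | task03/main.py | hillClimbingFirst
-- ===== SOURCE A (Python) =====
-- def avaliaSolucao(solucao, valores, pesos, q):
--     valorMochila = 0
--     pesoMochila = 0
--     for i in range(len(solucao)):
--         if solucao[i]:
--             valorMochila += valores[i]
--             pesoMochila += pesos[i]
--     if pesoMochila > q:
--         return 0, pesoMochila
--     return valorMochila, pesoMochila
--
-- def gerarVizinhanca(solucao):
--     vizinhanca = []
--     for i in range(len(solucao)):
--         vizinho = solucao[:]
--         vizinho[i] = 1 - solucao[i]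
--         vizinhanca.append(vizinho)
--     return vizinhanca
--
-- def hillClimbingFirst(Q, valores, pesos, solucaoInicial):
--     solucaoAtual = solucaoInicial
--     valorAtual, _ = avaliaSolucao(solucaoAtual, valores, pesos, Q)
--
--     while True:
--         vizinhanca = gerarVizinhanca(solucaoAtual)
--         melhorou = False
--
--         for vizinho in vizinhanca:
--             valorVizinho, _ = avaliaSolucao(vizinho, valores, pesos, Q)
--             if valorVizinho > valorAtual:
--                 solucaoAtual = vizinho
--                 valorAtual = valorVizinho
--                 melhorou = True
--                 break
--
--         if not melhorou:
--             break
--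
--     return solucaoAtual, valorAtual
-- ===== SOURCE B (Python) =====
-- def hillClimbingFirst(Q, valores, pesos, solucaoInicial):
--     # One O(n) pass per round, scoring each single-bit flip in O(1) from
--     # running raw totals; the solution list is rebuilt only at the accepted flip.
--     s = list(solucaoInicial)
--     rawV = sum(v for b, v in zip(s, valores) if b)
--     rawW = sum(w for b, w in zip(s, pesos) if b)
--     cur = 0 if rawW > Q else rawV
--     while True:
--         r = _firstImprovingFlip(Q, rawV, rawW, cur, s, valores, pesos)
--         if r is None:
--             return s, cur
--         s, rawV, rawW, cur = r
--
--
-- def _firstImprovingFlip(Q, rawV, rawW, cur, bits, vs, ws):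
--     for k, b in enumerate(bits):
--         d = (0 if b == 1 else 1) - (1 if b else 0)
--         nw = rawW + d * ws[k]
--         nv = rawV + d * vs[k]
--         cand = 0 if nw > Q else nv
--         if cur < cand:
--             return bits[:k] + [1 - b] + bits[k + 1:], nv, nw, cand
--     return None
-- ===== Notes on version B (the rewrite author's own statement) =====
-- stated objective: faster
-- what changed: B keeps running raw value/weight totals and scores each single-bit-flip neighbor in O(1) by an incremental delta while walking the zipped (bit,value,weight) triples, instead of A's materialising the whole neighborhood and re-summing every neighbor from scratch each round.
import Mathlib
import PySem

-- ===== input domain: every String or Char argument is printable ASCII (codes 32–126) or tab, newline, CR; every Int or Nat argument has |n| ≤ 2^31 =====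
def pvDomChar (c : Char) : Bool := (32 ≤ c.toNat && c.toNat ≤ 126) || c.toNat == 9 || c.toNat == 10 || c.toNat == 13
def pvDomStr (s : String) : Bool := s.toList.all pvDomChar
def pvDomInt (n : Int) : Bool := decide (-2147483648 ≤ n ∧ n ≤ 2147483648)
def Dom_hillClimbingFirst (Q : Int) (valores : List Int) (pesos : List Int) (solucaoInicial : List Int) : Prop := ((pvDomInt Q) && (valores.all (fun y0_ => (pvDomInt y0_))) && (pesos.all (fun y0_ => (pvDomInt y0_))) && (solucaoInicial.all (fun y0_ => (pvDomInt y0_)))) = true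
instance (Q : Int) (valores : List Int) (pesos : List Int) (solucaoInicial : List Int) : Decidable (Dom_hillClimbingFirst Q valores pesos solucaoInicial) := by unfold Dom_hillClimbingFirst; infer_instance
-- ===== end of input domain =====

-- B scores each single-bit-flip neighbor in O(1) from running raw value/weight
-- totals in one pass over the zipped triples, instead of A's rebuilding and
-- re-summing the whole neighborhood each round (objective: faster).

-- Mathematical helpers cited by name in port A's termination argument
-- (decreasing_by) and in port B's fuel bound, hence placed above the ports.

-- sum of vals over the truthy positions of s (the raw knapsack value)
def pvSumV (vals : List Int) (s : List Int) : Int :=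
  ∑ j ∈ Finset.range s.length, (if s.getD j 0 ≠ 0 then vals.getD j 0 else 0)

-- upper bound on any raw value: the sum of the positive parts of vals
def pvPosB (vals : List Int) : Int := (vals.map (fun v => max v 0)).sum

theorem pvPosB_nonneg (vals : List Int) : 0 ≤ pvPosB vals := by
  induction vals with
  | nil => simp [pvPosB]
  | cons v tl ih =>
      simp only [pvPosB, List.map_cons, List.sum_cons] at *
      have : (0:Int) ≤ max v 0 := le_max_right _ _
      linarith

theorem pvMaxSum_le (vals : List Int) : ∀ (n : ℕ),
    (∑ j ∈ Finset.range n, max (vals.getD j 0) 0) ≤ pvPosB vals := by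
  induction vals with
  | nil =>
      intro n
      have h0 : ∀ j ∈ Finset.range n, max (([] : List Int).getD j 0) 0 = 0 := by
        intro j _; simp [List.getD]
      rw [Finset.sum_congr rfl h0]
      simp [pvPosB]
  | cons v tl ih =>
      intro n
      cases n with
      | zero =>
          simp only [Finset.range_zero, Finset.sum_empty]
          exact pvPosB_nonneg _
      | succ m =>
          rw [Finset.sum_range_succ']
          have h1 : ∀ j ∈ Finset.range m,
              max ((v :: tl).getD (j + 1) 0) 0 = max (tl.getD j 0) 0 := by
            intro j _; simp
          rw [Finset.sum_congr rfl h1]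
          have h2 := ih m
          have h3 : pvPosB (v :: tl) = max v 0 + pvPosB tl := by
            simp [pvPosB]
          simp only [List.getD_cons_zero, h3]
          linarith [le_max_right v (0:Int)]

theorem pvSumV_le (vals s : List Int) : pvSumV vals s ≤ pvPosB vals := by
  unfold pvSumV
  calc (∑ j ∈ Finset.range s.length, (if s.getD j 0 ≠ 0 then vals.getD j 0 else 0))
      ≤ ∑ j ∈ Finset.range s.length, max (vals.getD j 0) 0 := by
        apply Finset.sum_le_sum
        intro j _
        split_ifs
        · exact le_max_left _ _
        · exact le_max_right _ _
    _ ≤ pvPosB vals := pvMaxSum_le vals s.length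

-- ===== PORT A =====

def avaliaSolucao (solucao : List Int) (valores : List Int) (pesos : List Int) (q : Int) : Int × Int :=
  -- the for-loop over range(len(solucao)) becomes a foldl over List.range;
  -- inside Pre_ every index accessed is in range, so getD _ _ 0 is exact
  let vp := (List.range solucao.length).foldl
    (fun (acc : Int × Int) i =>
      if solucao.getD i 0 ≠ 0 then (acc.1 + valores.getD i 0, acc.2 + pesos.getD i 0) else acc)
    (0, 0)
  if vp.2 > q then (0, vp.2) else (vp.1, vp.2)

def gerarVizinhanca (solucao : List Int) : List (List Int) :=
  -- copy-and-flip-one-position for each index, in index order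
  (List.range solucao.length).map (fun i => solucao.set i (1 - solucao.getD i 0))

theorem pvFoldPair (valores pesos s : List Int) : ∀ (n : ℕ) (a b : Int),
    (List.range n).foldl
      (fun (acc : Int × Int) i =>
        if s.getD i 0 ≠ 0 then (acc.1 + valores.getD i 0, acc.2 + pesos.getD i 0) else acc)
      (a, b)
    = (a + ∑ j ∈ Finset.range n, (if s.getD j 0 ≠ 0 then valores.getD j 0 else 0),
       b + ∑ j ∈ Finset.range n, (if s.getD j 0 ≠ 0 then pesos.getD j 0 else 0)) := by
  intro n
  induction n with
  | zero => intro a b; simp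
  | succ m ih =>
      intro a b
      rw [List.range_succ, List.foldl_append, ih, Finset.sum_range_succ, Finset.sum_range_succ]
      simp only [List.foldl_cons, List.foldl_nil]
      split_ifs <;> simp [add_assoc]

theorem pvAvalia_eq (s valores pesos : List Int) (q : Int) :
    avaliaSolucao s valores pesos q
    = (if pvSumV pesos s > q then 0 else pvSumV valores s, pvSumV pesos s) := by
  unfold avaliaSolucao pvSumV
  rw [pvFoldPair]
  simp only [zero_add]
  split_ifs <;> rfl

theorem pvAvalia_fst_le (s valores pesos : List Int) (q : Int) :
    (avaliaSolucao s valores pesos q).1 ≤ pvPosB valores := by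
  rw [pvAvalia_eq]
  dsimp only
  split_ifs
  · exact pvPosB_nonneg valores
  · exact pvSumV_le valores s

-- the while-True loop of A: find the first improving neighbor, move, repeat
def hcLoop (Q : Int) (valores pesos : List Int) (solucaoAtual : List Int) (valorAtual : Int) : List Int × Int :=
  match h : (gerarVizinhanca solucaoAtual).find?
      (fun viz => decide (valorAtual < (avaliaSolucao viz valores pesos Q).1)) with
  | none => (solucaoAtual, valorAtual)
  | some viz => hcLoop Q valores pesos viz (avaliaSolucao viz valores pesos Q).1
termination_by (pvPosB valores + 1 - valorAtual).toNat
decreasing_by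
  have h1 : valorAtual < (avaliaSolucao viz valores pesos Q).1 := by
    have := List.find?_some h
    simpa using this
  have h2 := pvAvalia_fst_le viz valores pesos Q
  omega

def hillClimbingFirst (Q : Int) (valores : List Int) (pesos : List Int) (solucaoInicial : List Int) : List Int × Int :=
  hcLoop Q valores pesos solucaoInicial (avaliaSolucao solucaoInicial valores pesos Q).1

-- ===== PORT B =====

-- B's _firstImprovingFlip: walk the bits with their enumerate index k; at the
-- first flip whose O(1) delta score beats cur, rebuild the list there (the
-- prefix-rebuild bits[:k] + [1-b] + bits[k+1:] is the cons-rebuild below).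
def pvFlipScan (Q rawV rawW cur : Int) (vs ws : List Int) : Nat → List Int → Option (List Int × Int × Int × Int)
  | _, [] => none
  | k, b :: bits =>
      let d : Int := (if b = 1 then 0 else 1) - (if b ≠ 0 then 1 else 0)
      -- Python's ws[k] / vs[k]: getD is exact inside Pre_, where every scanned
      -- index is in range (outside Pre_ the Python raises IndexError here)
      let nw := rawW + d * ws.getD k 0
      let nv := rawV + d * vs.getD k 0
      let cand := if nw > Q then 0 else nv
      if cur < cand then some ((1 - b) :: bits, nv, nw, cand)
      else
        match pvFlipScan Q rawV rawW cur vs ws (k + 1) bits with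
        | none => none
        | some (s', x, y, z) => some (b :: s', x, y, z)

-- B's while-True loop; fuel only makes it total (proved sufficient below)
def pvFlipLoop (Q : Int) (vs ws : List Int) : Nat → List Int → Int → Int → Int → List Int × Int
  | 0, s, _, _, cur => (s, cur)
  | fuel + 1, s, rawV, rawW, cur =>
      match pvFlipScan Q rawV rawW cur vs ws 0 s with
      | none => (s, cur)
      | some (s', nv, nw, c) => pvFlipLoop Q vs ws fuel s' nv nw c

def hillClimbingFirst_alt (Q : Int) (valores : List Int) (pesos : List Int) (solucaoInicial : List Int) : List Int × Int :=
  -- initial raw totals computed once (B's two sum-over-zip comprehensions)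
  let s := solucaoInicial
  let rawV := (s.zip valores).foldl (fun (a : Int) p => if p.1 ≠ 0 then a + p.2 else a) 0
  let rawW := (s.zip pesos).foldl (fun (a : Int) p => if p.1 ≠ 0 then a + p.2 else a) 0
  let cur := if rawW > Q then 0 else rawV
  pvFlipLoop Q valores pesos ((pvPosB valores - cur).toNat + 1) s rawV rawW cur

-- ===== PRECONDITION & SPEC =====
-- Pre_ excludes exactly the inputs where Python A raises IndexError: A's final
-- (unimproving) round evaluates every one-position-flip neighbor, which indexes
-- valores[i] and pesos[i] for every i < len(solucaoInicial).
def Pre_hillClimbingFirst (Q : Int) (valores : List Int) (pesos : List Int) (solucaoInicial : List Int) : Prop :=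
  solucaoInicial.length ≤ valores.length ∧ solucaoInicial.length ≤ pesos.length
instance (Q : Int) (valores : List Int) (pesos : List Int) (solucaoInicial : List Int) : Decidable (Pre_hillClimbingFirst Q valores pesos solucaoInicial) := by unfold Pre_hillClimbingFirst; infer_instance

def pvWitness_hillClimbingFirst : Int × List Int × List Int × List Int := (10, [5, 3], [2, 4], [0, 0])

def Spec_hillClimbingFirst (Q : Int) (valores : List Int) (pesos : List Int) (solucaoInicial : List Int) (out : List Int × Int) : Prop := out = hillClimbingFirst_alt Q valores pesos solucaoInicial
instance (Q : Int) (valores : List Int) (pesos : List Int) (solucaoInicial : List Int) (out : List Int × Int) : Decidable (Spec_hillClimbingFirst Q valores pesos solucaoInicial out) := by unfold Spec_hillClimbingFirst; infer_instance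

-- ===== CLAIM (what is proved, stated in full; the proofs are below) =====
def Claim_equal_hillClimbingFirst : Prop := ∀ (Q : Int) (valores : List Int) (pesos : List Int) (solucaoInicial : List Int), Dom_hillClimbingFirst Q valores pesos solucaoInicial → Pre_hillClimbingFirst Q valores pesos solucaoInicial → Spec_hillClimbingFirst Q valores pesos solucaoInicial (hillClimbingFirst Q valores pesos solucaoInicial)

-- ===== LEMMAS AND PROOFS =====

theorem pvSumV_nil (vals : List Int) : pvSumV vals [] = 0 := by
  simp [pvSumV]

theorem pvSumV_cons (v : Int) (tv : List Int) (b : Int) (bs : List Int) :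
    pvSumV (v :: tv) (b :: bs) = (if b ≠ 0 then v else 0) + pvSumV tv bs := by
  unfold pvSumV
  simp only [List.length_cons]
  rw [Finset.sum_range_succ']
  have h1 : ∀ j ∈ Finset.range bs.length,
      (if (b :: bs).getD (j + 1) 0 ≠ 0 then (v :: tv).getD (j + 1) 0 else 0)
      = (if bs.getD j 0 ≠ 0 then tv.getD j 0 else 0) := by
    intro j _; simp
  rw [Finset.sum_congr rfl h1]
  simp [add_comm]

-- (if (1-b)≠0 then v else 0) = (if b≠0 then v else 0) + d*v, d the Python delta
theorem pvFlipIf (b v : Int) :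
    (if (1 - b) ≠ 0 then v else 0)
      = (if b ≠ 0 then v else 0) + ((if b = 1 then (0:Int) else 1) - (if b ≠ 0 then 1 else 0)) * v := by
  by_cases h1 : b = 1
  · subst h1; norm_num
  · by_cases h0 : b = 0
    · subst h0; norm_num
    · have hb : (1:Int) - b ≠ 0 := by omega
      simp [h1, h0, hb]

-- the initial sum-over-zip equals pvSumV when s is not longer than vals
theorem pvZipFold (s : List Int) : ∀ (vals : List Int) (a : Int), s.length ≤ vals.length →
    (s.zip vals).foldl (fun (x : Int) p => if p.1 ≠ 0 then x + p.2 else x) a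
    = a + pvSumV vals s := by
  induction s with
  | nil => intro vals a _; simp [pvSumV_nil]
  | cons b bs ih =>
      intro vals a hlen
      cases vals with
      | nil => simp at hlen
      | cons v tv =>
          simp only [List.zip_cons_cons, List.foldl_cons]
          rw [ih tv _ (by simpa using hlen), pvSumV_cons]
          split_ifs <;> ring

theorem pvFind?_congr {α : Type} (p q : α → Bool) : ∀ (l : List α),
    (∀ a ∈ l, p a = q a) → l.find? p = l.find? q := by
  intro l
  induction l with
  | nil => intro _; rfl
  | cons a tl ih =>
      intro h
      have ha := h a (List.mem_cons_self ..)
      rw [List.find?_cons, List.find?_cons, ha, ih (fun x hx => h x (List.mem_cons_of_mem _ hx))]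

theorem pvHcLoop_none (Q : Int) (valores pesos s : List Int) (cur : Int)
    (h : (gerarVizinhanca s).find?
      (fun viz => decide (cur < (avaliaSolucao viz valores pesos Q).1)) = none) :
    hcLoop Q valores pesos s cur = (s, cur) := by
  rw [hcLoop]
  split
  · rfl
  · rename_i viz heq
    rw [h] at heq
    cases heq

theorem pvHcLoop_some (Q : Int) (valores pesos s : List Int) (cur : Int) (viz : List Int)
    (h : (gerarVizinhanca s).find?
      (fun viz => decide (cur < (avaliaSolucao viz valores pesos Q).1)) = some viz) :
    hcLoop Q valores pesos s cur
      = hcLoop Q valores pesos viz (avaliaSolucao viz valores pesos Q).1 := by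
  rw [hcLoop]
  split
  · rename_i heq
    rw [h] at heq
    cases heq
  · rename_i viz' heq
    rw [h] at heq
    cases heq
    rfl

-- proof-side reformulation of B's scan: consume the three lists in lockstep
def pvZipScan (Q rawV rawW cur : Int) : List Int → List Int → List Int → Option (List Int × Int × Int × Int)
  | b :: bits, v :: vs, w :: ws =>
      let d : Int := (if b = 1 then 0 else 1) - (if b ≠ 0 then 1 else 0)
      let nw := rawW + d * w
      let nv := rawV + d * v
      let cand := if nw > Q then 0 else nv
      if cur < cand then some ((1 - b) :: bits, nv, nw, cand)
      else
        match pvZipScan Q rawV rawW cur bits vs ws with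
        | none => none
        | some (s', x, y, z) => some (b :: s', x, y, z)
  | _, _, _ => none

theorem pvFlipScan_eq_zip (Q rawV rawW cur : Int) (vs ws : List Int) : ∀ (bits : List Int) (k : ℕ),
    k + bits.length ≤ vs.length → k + bits.length ≤ ws.length →
    pvFlipScan Q rawV rawW cur vs ws k bits
      = pvZipScan Q rawV rawW cur bits (vs.drop k) (ws.drop k) := by
  intro bits
  induction bits with
  | nil => intro k _ _; cases vs.drop k <;> cases ws.drop k <;> rfl
  | cons b bs ih =>
      intro k hv hw
      have hkv : k < vs.length := by simp only [List.length_cons] at hv; omega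
      have hkw : k < ws.length := by simp only [List.length_cons] at hw; omega
      rw [List.drop_eq_getElem_cons hkv, List.drop_eq_getElem_cons hkw]
      have gv : vs.getD k 0 = vs[k] := by
        rw [List.getD_eq_getElem?_getD, List.getElem?_eq_getElem hkv]; rfl
      have gw : ws.getD k 0 = ws[k] := by
        rw [List.getD_eq_getElem?_getD, List.getElem?_eq_getElem hkw]; rfl
      simp only [pvFlipScan, pvZipScan, gv, gw]
      rw [ih (k + 1) (by simp only [List.length_cons] at hv; omega)
            (by simp only [List.length_cons] at hw; omega)]

-- characterisation of B's scan as a find? over flip indices, with running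
-- offsets av/aw for the already-consumed prefix
theorem pvZipScan_spec (Q cur : Int) : ∀ (bits vs ws : List Int) (av aw : Int),
    bits.length ≤ vs.length → bits.length ≤ ws.length →
    pvZipScan Q (av + pvSumV vs bits) (aw + pvSumV ws bits) cur bits vs ws
    = ((List.range bits.length).find? (fun i =>
          decide (cur < (if aw + pvSumV ws (bits.set i (1 - bits.getD i 0)) > Q then 0
                         else av + pvSumV vs (bits.set i (1 - bits.getD i 0)))))).map
        (fun i => (bits.set i (1 - bits.getD i 0),
                   av + pvSumV vs (bits.set i (1 - bits.getD i 0)),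
                   aw + pvSumV ws (bits.set i (1 - bits.getD i 0)),
                   if aw + pvSumV ws (bits.set i (1 - bits.getD i 0)) > Q then 0
                   else av + pvSumV vs (bits.set i (1 - bits.getD i 0)))) := by
  intro bits
  induction bits with
  | nil => intro vs ws av aw _ _; simp [pvZipScan]
  | cons b bs ih =>
      intro vs ws av aw hv hw
      cases vs with
      | nil => simp at hv
      | cons v tv =>
        cases ws with
        | nil => simp at hw
        | cons w tw =>
          have hv' : bs.length ≤ tv.length := by simpa using hv
          have hw' : bs.length ≤ tw.length := by simpa using hw
          -- the head flip's incremental score equals its from-scratch score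
          have hnv : av + pvSumV (v :: tv) (b :: bs)
              + ((if b = 1 then (0:Int) else 1) - (if b ≠ 0 then 1 else 0)) * v
              = av + pvSumV (v :: tv) ((1 - b) :: bs) := by
            rw [pvSumV_cons, pvSumV_cons, pvFlipIf b v]; ring
          have hnw : aw + pvSumV (w :: tw) (b :: bs)
              + ((if b = 1 then (0:Int) else 1) - (if b ≠ 0 then 1 else 0)) * w
              = aw + pvSumV (w :: tw) ((1 - b) :: bs) := by
            rw [pvSumV_cons, pvSumV_cons, pvFlipIf b w]; ring
          simp only [pvZipScan]
          rw [List.length_cons, List.range_succ_eq_map]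
          have hset0 : (b :: bs).set 0 (1 - (b :: bs).getD 0 0) = (1 - b) :: bs := by simp
          by_cases hc : cur < (if aw + pvSumV (w :: tw) ((1 - b) :: bs) > Q then 0
                               else av + pvSumV (v :: tv) ((1 - b) :: bs))
          · rw [List.find?_cons_of_pos (by simp only [hset0, decide_eq_true_eq]; exact hc)]
            simp only [Option.map_some, hset0]
            rw [if_pos (by rw [hnw, hnv]; exact hc)]
            rw [hnv, hnw]
          · rw [List.find?_cons_of_neg (by simp only [hset0, decide_eq_true_eq]; exact hc)]
            rw [if_neg (by rw [hnw, hnv]; exact hc)]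
            -- shift: tail scan with offsets grown by the head's contribution
            have hrv : av + pvSumV (v :: tv) (b :: bs)
                = (av + (if b ≠ 0 then v else 0)) + pvSumV tv bs := by
              rw [pvSumV_cons]; ring
            have hrw : aw + pvSumV (w :: tw) (b :: bs)
                = (aw + (if b ≠ 0 then w else 0)) + pvSumV tw bs := by
              rw [pvSumV_cons]; ring
            rw [hrv, hrw, ih tv tw _ _ hv' hw']
            rw [List.find?_map]
            have hpred : ∀ (i : ℕ),
                ((aw + (if b ≠ 0 then w else 0)) + pvSumV tw (bs.set i (1 - bs.getD i 0))
                 = aw + pvSumV (w :: tw) ((b :: bs).set (i+1) (1 - (b :: bs).getD (i+1) 0)))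
                ∧ ((av + (if b ≠ 0 then v else 0)) + pvSumV tv (bs.set i (1 - bs.getD i 0))
                 = av + pvSumV (v :: tv) ((b :: bs).set (i+1) (1 - (b :: bs).getD (i+1) 0))) := by
              intro i
              constructor
              · rw [List.getD_cons_succ, List.set_cons_succ, pvSumV_cons]; ring
              · rw [List.getD_cons_succ, List.set_cons_succ, pvSumV_cons]; ring
            have hfind : (List.range bs.length).find? ((fun i =>
                  decide (cur < (if aw + pvSumV (w :: tw) ((b :: bs).set i (1 - (b :: bs).getD i 0)) > Q then 0
                                 else av + pvSumV (v :: tv) ((b :: bs).set i (1 - (b :: bs).getD i 0))))) ∘ Nat.succ)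
                = (List.range bs.length).find? (fun i =>
                  decide (cur < (if (aw + (if b ≠ 0 then w else 0)) + pvSumV tw (bs.set i (1 - bs.getD i 0)) > Q then 0
                                 else (av + (if b ≠ 0 then v else 0)) + pvSumV tv (bs.set i (1 - bs.getD i 0))))) := by
              apply pvFind?_congr _ _
              intro i _
              have h := hpred i
              simp only [Function.comp]
              rw [← h.1, ← h.2]
            rw [hfind]
            cases hcase : (List.range bs.length).find? (fun i =>
                decide (cur < (if (aw + (if b ≠ 0 then w else 0)) + pvSumV tw (bs.set i (1 - bs.getD i 0)) > Q then 0
                               else (av + (if b ≠ 0 then v else 0)) + pvSumV tv (bs.set i (1 - bs.getD i 0))))) with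
            | none => simp
            | some i =>
                simp only [Option.map_some]
                have h := hpred i
                rw [← h.1, ← h.2, List.getD_cons_succ, List.set_cons_succ]

-- gerarVizinhanca's find? as a find? over flip indices
theorem pvViz_find (Q cur : Int) (s vs ws : List Int) :
    (gerarVizinhanca s).find? (fun viz => decide (cur < (avaliaSolucao viz vs ws Q).1))
    = ((List.range s.length).find? (fun i =>
        decide (cur < (avaliaSolucao (s.set i (1 - s.getD i 0)) vs ws Q).1))).map
        (fun i => s.set i (1 - s.getD i 0)) := by
  unfold gerarVizinhanca
  rw [List.find?_map]
  rfl

-- the two loops agree, given the running-total invariants and enough fuel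
theorem pvLoop_eq (Q : Int) (vs ws : List Int) : ∀ (fuel : ℕ) (s : List Int) (rawV rawW cur : Int),
    s.length ≤ vs.length → s.length ≤ ws.length →
    rawV = pvSumV vs s → rawW = pvSumV ws s → cur = (if rawW > Q then 0 else rawV) →
    (pvPosB vs + 1 - cur).toNat ≤ fuel →
    pvFlipLoop Q vs ws fuel s rawV rawW cur = hcLoop Q vs ws s cur := by
  intro fuel
  induction fuel with
  | zero =>
      intro s rawV rawW cur _ _ hV hW hc hfuel
      have hcur : cur ≤ pvPosB vs := by
        rw [hc]
        split_ifs
        · exact pvPosB_nonneg vs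
        · rw [hV]; exact pvSumV_le vs s
      omega
  | succ fuel ih =>
      intro s rawV rawW cur hlv hlw hV hW hc hfuel
      have hscan := pvZipScan_spec Q cur s vs ws 0 0 hlv hlw
      simp only [zero_add] at hscan
      have hbridge : pvFlipScan Q (pvSumV vs s) (pvSumV ws s) cur vs ws 0 s
          = pvZipScan Q (pvSumV vs s) (pvSumV ws s) cur s vs ws := by
        have h := pvFlipScan_eq_zip Q (pvSumV vs s) (pvSumV ws s) cur vs ws s 0
          (by simpa using hlv) (by simpa using hlw)
        simpa using h
      rw [← hbridge] at hscan
      rw [hV, hW] at *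
      -- rewrite the scan's predicate/values through avaliaSolucao
      have havp : ∀ i : ℕ,
          (if pvSumV ws (s.set i (1 - s.getD i 0)) > Q then (0:Int)
           else pvSumV vs (s.set i (1 - s.getD i 0)))
          = (avaliaSolucao (s.set i (1 - s.getD i 0)) vs ws Q).1 := by
        intro i; rw [pvAvalia_eq]
      have hpredeq : (List.range s.length).find? (fun i =>
            decide (cur < (if pvSumV ws (s.set i (1 - s.getD i 0)) > Q then 0
                           else pvSumV vs (s.set i (1 - s.getD i 0)))))
          = (List.range s.length).find? (fun i =>
            decide (cur < (avaliaSolucao (s.set i (1 - s.getD i 0)) vs ws Q).1)) := by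
        apply pvFind?_congr _ _ _
        intro i _
        rw [havp i]
      rw [hpredeq] at hscan
      simp only [pvFlipLoop]
      cases hf : (List.range s.length).find? (fun i =>
          decide (cur < (avaliaSolucao (s.set i (1 - s.getD i 0)) vs ws Q).1)) with
      | none =>
          rw [hf] at hscan
          simp only [Option.map_none] at hscan
          rw [hscan]
          rw [pvHcLoop_none Q vs ws s cur (by rw [pvViz_find, hf]; rfl)]
      | some i =>
          rw [hf] at hscan
          simp only [Option.map_some] at hscan
          rw [hscan]
          have hlt : cur < (avaliaSolucao (s.set i (1 - s.getD i 0)) vs ws Q).1 := by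
            have := List.find?_some hf
            simpa using this
          have hle := pvAvalia_fst_le (s.set i (1 - s.getD i 0)) vs ws Q
          have hA : hcLoop Q vs ws s cur
              = hcLoop Q vs ws (s.set i (1 - s.getD i 0))
                  (avaliaSolucao (s.set i (1 - s.getD i 0)) vs ws Q).1 :=
            pvHcLoop_some Q vs ws s cur _ (by rw [pvViz_find, hf]; rfl)
          rw [hA, havp i]
          exact ih (s.set i (1 - s.getD i 0)) _ _ _
            (by rw [List.length_set]; exact hlv) (by rw [List.length_set]; exact hlw)
            rfl rfl (by rw [pvAvalia_eq]) (by omega)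

-- ===== VERDICT (by name: the statement is the Claim_ definition above) =====
theorem hillClimbingFirst_spec : Claim_equal_hillClimbingFirst := by
  intro Q valores pesos s _ hpre
  have e1 := pvZipFold s valores 0 hpre.1
  have e2 := pvZipFold s pesos 0 hpre.2
  simp only [zero_add] at e1 e2
  unfold Spec_hillClimbingFirst hillClimbingFirst hillClimbingFirst_alt
  simp only [e1, e2]
  have hcur : (if pvSumV pesos s > Q then (0:Int) else pvSumV valores s)
      = (avaliaSolucao s valores pesos Q).1 := by rw [pvAvalia_eq]
  have hcle : (avaliaSolucao s valores pesos Q).1 ≤ pvPosB valores :=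
    pvAvalia_fst_le s valores pesos Q
  rw [pvLoop_eq Q valores pesos _ s _ _ _ hpre.1 hpre.2 rfl rfl rfl
      (by rw [hcur]; omega)]
  rw [hcur]
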